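-- pv_equiv track=rewrite | github.com/MareoRaft/k_combinat_for_sage | src/root_ideal.py | selected_rows_to_maximum_root_ideal
-- ===== SOURCE A (Python) =====
-- def selected_rows_to_maximum_root_ideal(n, selected_indecis):
--     # Given the dimension of the square n and the selected rows, output the root ideal
--     root_ideal_cells = []
--     selected_indecis = set(selected_indecis)
--     permitted_col_indecis = set(range(n)) - selected_indecis
--     for i in range(n):
--         if i in selected_indecis:
--             if permitted_col_indecis:
--                 smallest_unblocked_index = min(permitted_col_indecis)
--                 root_ideal_cells += [(i, j) for j in range(smallest_unblocked_index, n)]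
--                 permitted_col_indecis.remove(smallest_unblocked_index)
--                 selected_indecis.add(smallest_unblocked_index)
--     return root_ideal_cells
-- ===== SOURCE B (Python) =====
-- def selected_rows_to_maximum_root_ideal(n, selected_indecis):
--     # Two staged passes, no evolving selected/permitted sets: (1) pick the
--     # firing rows with a frontier comparison against the fixed ascending
--     # complement list (row i fires iff a column is still available and
--     # i is initially selected or i lies below the next available column,
--     # i.e. i was itself already consumed as a column); (2) build the cells
--     # by zipping the firing rows with the consumed columns.
--     blocked = set(selected_indecis)
--     cols = [c for c in range(n) if c not in blocked]
--     rows = []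
--     for i in range(n):
--         if len(rows) < len(cols) and (i in blocked or i < cols[len(rows)]):
--             rows.append(i)
--     return [(i, j) for i, c in zip(rows, cols) for j in range(c, n)]
-- ===== Notes on version B (the rewrite author's own statement) =====
-- stated objective: alternative
-- what changed: Replaces A's single simulation loop with mutating selected/permitted sets by two staged passes: the firing rows are chosen by a frontier comparison (i < next available column) against the fixed ascending complement list, and the cells are then produced by zipping firing rows with consumed columns; no set ever changes.
import Mathlib
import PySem

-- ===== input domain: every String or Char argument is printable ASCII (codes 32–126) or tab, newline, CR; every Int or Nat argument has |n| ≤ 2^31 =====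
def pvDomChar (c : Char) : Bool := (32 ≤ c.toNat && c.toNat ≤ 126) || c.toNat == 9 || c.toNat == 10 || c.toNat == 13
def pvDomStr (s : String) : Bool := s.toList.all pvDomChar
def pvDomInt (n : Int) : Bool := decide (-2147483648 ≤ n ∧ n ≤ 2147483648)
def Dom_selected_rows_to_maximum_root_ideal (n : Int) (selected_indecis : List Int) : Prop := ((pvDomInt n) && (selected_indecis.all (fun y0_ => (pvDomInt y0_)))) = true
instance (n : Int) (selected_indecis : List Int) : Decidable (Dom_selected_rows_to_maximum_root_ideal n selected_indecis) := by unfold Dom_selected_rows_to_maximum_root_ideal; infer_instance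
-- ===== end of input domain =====

-- B replaces A's one-pass simulation with mutating selected/permitted sets by two staged
-- passes: firing rows chosen by a frontier comparison against the fixed ascending
-- complement list, then cells produced by zipping firing rows with consumed columns.

-- ===== PORT A =====
-- one loop iteration of A: state = (root_ideal_cells, permitted_col_indecis, selected_indecis)
def pvStepA (n : Int) (st : List (Int × Int) × PySem.Set Int × PySem.Set Int) (i : Int) :
    List (Int × Int) × PySem.Set Int × PySem.Set Int :=
  let (cells, perm, sel) := st
  if PySem.Set.contains sel i then
    if perm = [] then (cells, perm, sel)      -- `if permitted_col_indecis:` falsy ⇒ skip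
    else
      match PySem.List.min? perm (fun x => x) with   -- min(permitted_col_indecis)
      | some m =>
          (cells ++ (PySem.List.pyRange m n 1).map (fun j => (i, j)),
           (PySem.Set.remove? perm m).getD perm,     -- m ∈ perm, so remove? is always `some`
           PySem.Set.add sel m)
      | none => (cells, perm, sel)                   -- unreachable: perm ≠ []
  else (cells, perm, sel)

def selected_rows_to_maximum_root_ideal (n : Int) (selected_indecis : List Int) : List (Int × Int) :=
  ((PySem.List.pyRange 0 n 1).foldl (pvStepA n)
    ([],
     PySem.Set.diff (PySem.Set.ofList (PySem.List.pyRange 0 n 1)) (PySem.Set.ofList selected_indecis),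
     PySem.Set.ofList selected_indecis)).1

-- ===== PORT B =====
-- one iteration of B's first pass: `if len(rows) < len(cols) and (i in blocked or i < cols[len(rows)]):`
-- (the index cols[len(rows)] is guarded by the length test, so getD is exact here)
def pvStepB (blocked : PySem.Set Int) (cols : List Int) (rows : List Int) (i : Int) : List Int :=
  if (rows.length : Int) < (cols.length : Int) then
    if PySem.Set.contains blocked i || decide (i < cols.getD rows.length 0) then rows ++ [i]
    else rows
  else rows

def selected_rows_to_maximum_root_ideal_alt (n : Int) (selected_indecis : List Int) : List (Int × Int) :=
  let blocked := PySem.Set.ofList selected_indecis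
  let cols := (PySem.List.pyRange 0 n 1).filter (fun c => !PySem.Set.contains blocked c)
  let rows := (PySem.List.pyRange 0 n 1).foldl (pvStepB blocked cols) []
  (rows.zip cols).flatMap (fun ic => (PySem.List.pyRange ic.2 n 1).map (fun j => (ic.1, j)))

-- ===== PRECONDITION & SPEC =====
def Spec_selected_rows_to_maximum_root_ideal (n : Int) (selected_indecis : List Int) (out : List (Int × Int)) : Prop := out = selected_rows_to_maximum_root_ideal_alt n selected_indecis
instance (n : Int) (selected_indecis : List Int) (out : List (Int × Int)) : Decidable (Spec_selected_rows_to_maximum_root_ideal n selected_indecis out) := by unfold Spec_selected_rows_to_maximum_root_ideal; infer_instance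

-- ===== CLAIM (what is proved, stated in full; the proofs are below) =====
def Claim_equal_selected_rows_to_maximum_root_ideal : Prop := ∀ (n : Int) (selected_indecis : List Int), Dom_selected_rows_to_maximum_root_ideal n selected_indecis → Spec_selected_rows_to_maximum_root_ideal n selected_indecis (selected_rows_to_maximum_root_ideal n selected_indecis)

-- ===== LEMMAS AND PROOFS =====

-- contains on a Set is membership
lemma pv_contains_decide (s : PySem.Set Int) (x : Int) :
    PySem.Set.contains s x = decide (x ∈ s) := by simp

-- min of a strictly increasing nonempty list is its head
lemma pv_min_sorted (c : Int) (rest : List Int)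
    (hp : (c :: rest).Pairwise (· < ·)) :
    PySem.List.min? (c :: rest) (fun x => x) = some c := by
  cases h : PySem.List.min? (c :: rest) (fun x => x) with
  | none => exact absurd ((PySem.List.min?_eq_none_iff _ _).mp h) (by simp)
  | some m =>
      have hmem := PySem.List.min?_mem h
      have hmin := PySem.List.min?_isMin h c (by simp)
      rcases List.mem_cons.mp hmem with h1 | h1
      · simp [h1]
      · have : c < m := (List.pairwise_cons.mp hp).1 m h1
        omega

-- discarding the head of a strictly increasing list leaves its tail
lemma pv_discard_sorted (c : Int) (rest : List Int)
    (hp : (c :: rest).Pairwise (· < ·)) :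
    PySem.Set.discard (c :: rest) c = rest := by
  simp only [PySem.Set.discard, List.filter]
  simp only [beq_self_eq_true, Bool.not_true]
  exact List.filter_eq_self.mpr (fun y hy => by
    have : c < y := (List.pairwise_cons.mp hp).1 y hy
    simp; omega)

-- B's first pass only appends: the accumulator is a prefix of the result
lemma pv_foldB_prefix (blocked : PySem.Set Int) (cols : List Int) (idxs : List Int) :
    ∀ rows, rows <+: idxs.foldl (pvStepB blocked cols) rows := by
  induction idxs with
  | nil => intro rows; exact List.prefix_refl rows
  | cons i t ih =>
      intro rows
      simp only [List.foldl_cons]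
      unfold pvStepB
      split_ifs with h1 h2
      · exact List.IsPrefix.trans (List.prefix_append rows [i]) (ih (rows ++ [i]))
      · exact ih rows
      · exact ih rows

-- removing the head of a strictly increasing list leaves its tail
lemma pv_remove_sorted (c : Int) (rest : List Int)
    (hp : (c :: rest).Pairwise (· < ·)) :
    PySem.Set.remove? (c :: rest) c = some rest := by
  have hd := pv_discard_sorted c rest hp
  simp [PySem.Set.remove?, PySem.Set.contains, hd]

-- membership in a strictly increasing prefix ↔ below the frontier element
lemma pv_take_mem_iff (cols : List Int) (hP : cols.Pairwise (· < ·))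
    (i : Int) (hiP : i ∈ cols) (k : Nat) (hk : k < cols.length) :
    i ∈ cols.take k ↔ i < cols[k] := by
  rcases List.getElem_of_mem hiP with ⟨m, hm, rfl⟩
  have hmono := List.pairwise_iff_getElem.mp hP
  constructor
  · intro hmem
    rcases List.mem_take_iff_getElem.mp hmem with ⟨t, ht, hEq⟩
    have ht' : t < k := lt_of_lt_of_le ht (by omega)
    have htm : t < cols.length := lt_of_lt_of_le ht (by simp)
    have : cols[t] < cols[k] := hmono t k htm hk (by omega)
    rw [hEq] at this
    exact this
  · intro hlt
    have hmk : m < k := by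
      by_contra hge
      push_neg at hge
      rcases lt_or_eq_of_le hge with h | h
      · have : cols[k] < cols[m] := hmono k m hk hm h
        omega
      · subst h; omega
    exact List.mem_take_iff_getElem.mpr ⟨m, by omega, rfl⟩

-- the main loop correspondence: A's simulation over a suffix of rows equals the
-- cells generated by zipping B's new firing rows with the remaining columns
lemma pv_loop (n : Int) (S0 : PySem.Set Int) (cols : List Int)
    (hP : cols.Pairwise (· < ·)) (idxs : List Int) :
    ∀ (k : Nat) (cells : List (Int × Int)) (selA : PySem.Set Int) (rows : List Int),
      rows.length = k → k ≤ cols.length →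
      (∀ i, PySem.Set.contains selA i = (PySem.Set.contains S0 i || decide (i ∈ cols.take k))) →
      (∀ i ∈ idxs, PySem.Set.contains S0 i = false → i ∈ cols) →
      (idxs.foldl (pvStepA n) (cells, cols.drop k, selA)).1
        = cells ++ (((idxs.foldl (pvStepB S0 cols) rows).drop k).zip (cols.drop k)).flatMap
            (fun ic => (PySem.List.pyRange ic.2 n 1).map (fun j => (ic.1, j))) := by
  induction idxs with
  | nil =>
      intro k cells selA rows hlen hk hsel hmem
      have hr : rows.drop k = [] := List.drop_eq_nil_of_le (by omega)
      simp [hr]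
  | cons i t ih =>
      intro k cells selA rows hlen hk hsel hmem
      simp only [List.foldl_cons]
      by_cases hklen : k < cols.length
      · -- columns remain: the frontier element exists
        have hdrop : cols.drop k = cols[k] :: cols.drop (k + 1) :=
          List.drop_eq_getElem_cons hklen
        have hdp : (cols[k] :: cols.drop (k + 1)).Pairwise (· < ·) :=
          hdrop ▸ hP.sublist (List.drop_sublist k cols)
        -- the two step conditions agree
        have hcond : (PySem.Set.contains S0 i || decide (i ∈ cols.take k))
            = (PySem.Set.contains S0 i || decide (i < cols.getD k 0)) := by
          cases hS : PySem.Set.contains S0 i with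
          | true => simp
          | false =>
              have hiP : i ∈ cols := hmem i (by simp) hS
              simp only [Bool.false_or]
              rw [List.getD_eq_getElem cols 0 hklen]
              exact decide_eq_decide.mpr (pv_take_mem_iff cols hP i hiP k hklen)
        cases hfire : (PySem.Set.contains S0 i || decide (i ∈ cols.take k)) with
        | true =>
          -- both fire
          have hA : PySem.Set.contains selA i = true := (hsel i).trans hfire
          have hmin := pv_min_sorted cols[k] (cols.drop (k+1)) hdp
          have hrm := pv_remove_sorted cols[k] (cols.drop (k+1)) hdp
          have hstepB : pvStepB S0 cols rows i = rows ++ [i] := by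
            unfold pvStepB
            rw [hlen, if_pos (by exact_mod_cast hklen), ← hcond, hfire, if_pos rfl]
          rw [hdrop, hstepB]
          have hstepA : pvStepA n (cells, cols[k] :: cols.drop (k + 1), selA) i
              = (cells ++ (PySem.List.pyRange cols[k] n 1).map (fun j => (i, j)),
                 cols.drop (k + 1), PySem.Set.add selA cols[k]) := by
            simp only [pvStepA, hA, if_true, hmin, hrm, reduceCtorEq, if_false,
              Option.getD_some]
          rw [hstepA]
          have hsel' : ∀ j, PySem.Set.contains (PySem.Set.add selA cols[k]) j
              = (PySem.Set.contains S0 j || decide (j ∈ cols.take (k + 1))) := by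
            intro j
            have h0 := hsel j
            simp only [pv_contains_decide] at h0 ⊢
            have hiff : (j ∈ selA) ↔ (j ∈ S0 ∨ j ∈ cols.take k) := by
              constructor
              · intro h
                have hrhs : (decide (j ∈ S0) || decide (j ∈ cols.take k)) = true := by
                  rw [← h0]; simp [h]
                rcases Bool.or_eq_true_iff.mp hrhs with hh | hh
                · exact Or.inl (of_decide_eq_true hh)
                · exact Or.inr (of_decide_eq_true hh)
              · intro h
                have hrhs : (decide (j ∈ S0) || decide (j ∈ cols.take k)) = true := by
                  rcases h with h | h <;> simp [h]
                exact of_decide_eq_true (h0.trans hrhs)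
            have htk : cols.take (k + 1) = cols.take k ++ [cols[k]] := by
              rw [List.take_add_one, List.getElem?_eq_getElem hklen]; rfl
            have hmem_iff : (j ∈ PySem.Set.add selA cols[k])
                ↔ (j ∈ S0 ∨ j ∈ cols.take (k + 1)) := by
              rw [htk, PySem.Set.mem_add]
              constructor
              · rintro (hs | hc)
                · rcases hiff.mp hs with h | h
                  · exact Or.inl h
                  · exact Or.inr (List.mem_append_left _ h)
                · exact Or.inr (List.mem_append_right _ (by simp [hc]))
              · rintro (hs | hc)
                · exact Or.inl (hiff.mpr (Or.inl hs))
                · rcases List.mem_append.mp hc with h | h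
                  · exact Or.inl (hiff.mpr (Or.inr h))
                  · exact Or.inr (by simpa using h)
            have hdec : decide (j ∈ PySem.Set.add selA cols[k])
                = decide (j ∈ S0 ∨ j ∈ cols.take (k + 1)) := decide_eq_decide.mpr hmem_iff
            rw [hdec]
            by_cases hs : j ∈ S0 <;> by_cases ht : j ∈ cols.take (k + 1) <;>
              simp [hs, ht]
          rw [ih (k+1) _ _ (rows ++ [i]) (by simp [hlen]) (by omega) hsel'
                (fun j hj hS => hmem j (by simp [hj]) hS)]
          -- align the zip: the fold's result has rows ++ [i] as a prefix
          rcases pv_foldB_prefix S0 cols t (rows ++ [i]) with ⟨rest, hrest⟩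
          rw [← hrest]
          have hd1 : ((rows ++ [i]) ++ rest).drop k = i :: rest := by
            rw [List.drop_append_of_le_length (by simp [hlen])]
            simp [hlen]
          have hd2 : ((rows ++ [i]) ++ rest).drop (k + 1) = rest := by
            rw [List.drop_append_of_le_length (by simp [hlen])]
            simp [hlen]
          rw [hd1, hd2, List.zip_cons_cons, List.flatMap_cons, List.append_assoc]
        | false =>
          -- neither fires
          have hA : PySem.Set.contains selA i = false := (hsel i).trans hfire
          have hstepB : pvStepB S0 cols rows i = rows := by
            unfold pvStepB
            rw [hlen, if_pos (by exact_mod_cast hklen), ← hcond, hfire,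
              if_neg (by simp)]
          have hstepA : pvStepA n (cells, cols.drop k, selA) i
              = (cells, cols.drop k, selA) := by
            simp only [pvStepA, hA, Bool.false_eq_true, if_false]
          rw [hstepA, hstepB]
          exact ih k cells selA rows hlen hk hsel
            (fun j hj hS => hmem j (by simp [hj]) hS)
      · -- no columns left: both sides skip
        have hk' : k = cols.length := by omega
        have hdropnil : cols.drop k = [] := by simp [hk']
        have hstepA : pvStepA n (cells, cols.drop k, selA) i
            = (cells, cols.drop k, selA) := by
          rw [hdropnil]
          simp only [pvStepA]
          split_ifs <;> rfl
        have hstepB : pvStepB S0 cols rows i = rows := by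
          unfold pvStepB
          rw [hlen, hk', if_neg (by simp)]
        rw [hstepA, hstepB]
        exact ih k cells selA rows hlen hk hsel
          (fun j hj hS => hmem j (by simp [hj]) hS)

theorem pv_ports_agree (n : Int) (selected_indecis : List Int) :
    selected_rows_to_maximum_root_ideal n selected_indecis
      = selected_rows_to_maximum_root_ideal_alt n selected_indecis := by
  simp only [selected_rows_to_maximum_root_ideal, selected_rows_to_maximum_root_ideal_alt]
  have hdiff : PySem.Set.diff (PySem.Set.ofList (PySem.List.pyRange 0 n 1))
      (PySem.Set.ofList selected_indecis)
      = (PySem.List.pyRange 0 n 1).filter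
          (fun c => !PySem.Set.contains (PySem.Set.ofList selected_indecis) c) := by
    rw [PySem.Set.diff,
        PySem.Set.ofList_eq_self_of_nodup _ (PySem.List.nodup_pyRange_one 0 n)]
  rw [hdiff]
  have hP : ((PySem.List.pyRange 0 n 1).filter
      (fun c => !PySem.Set.contains (PySem.Set.ofList selected_indecis) c)).Pairwise (· < ·) :=
    (PySem.List.pairwise_lt_pyRange_one 0 n).filter _
  have := pv_loop n (PySem.Set.ofList selected_indecis) _ hP
    (PySem.List.pyRange 0 n 1) 0 [] (PySem.Set.ofList selected_indecis) []
    rfl (Nat.zero_le _)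
    (fun i => by simp)
    (fun i hi hS => List.mem_filter.mpr ⟨hi, by rw [hS]; rfl⟩)
  simpa using this

-- ===== VERDICT (by name: the statement is the Claim_ definition above) =====
theorem selected_rows_to_maximum_root_ideal_spec : Claim_equal_selected_rows_to_maximum_root_ideal := by
  intro n sel _
  unfold Spec_selected_rows_to_maximum_root_ideal
  exact pv_ports_agree n sel
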